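-- pv_equiv track=rewrite | github.com/BertilBraun/Programming-Puzzles | 2024/6x6.py | calculate_lookup_table_index
-- ===== SOURCE A (Python) =====
-- from typing import Iterable
--
-- def calculate_lookup_table_index(buildings: Iterable[int], clue: int) -> int:
--     lookup_table_index = 0
--     for b in buildings:
--         lookup_table_index <<= 3
--         lookup_table_index += b
--     lookup_table_index <<= 3
--     lookup_table_index += clue
--     return lookup_table_index
-- ===== SOURCE B (Python) =====
-- def calculate_lookup_table_index(buildings, clue):
--     bs = list(buildings)
--     result = clue
--     shift = 3
--     for b in reversed(bs):
--         result += b << shift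
--         shift += 3
--     return result
-- ===== Notes on version B (the rewrite author's own statement) =====
-- stated objective: alternative
-- what changed: Replaced the Horner-style shifted accumulator (shift accumulator left, add digit, most-significant first) by a positional weighted sum: start from the clue, walk the buildings in reverse with an explicit growing shift exponent, adding b << shift each step.
import Mathlib
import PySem

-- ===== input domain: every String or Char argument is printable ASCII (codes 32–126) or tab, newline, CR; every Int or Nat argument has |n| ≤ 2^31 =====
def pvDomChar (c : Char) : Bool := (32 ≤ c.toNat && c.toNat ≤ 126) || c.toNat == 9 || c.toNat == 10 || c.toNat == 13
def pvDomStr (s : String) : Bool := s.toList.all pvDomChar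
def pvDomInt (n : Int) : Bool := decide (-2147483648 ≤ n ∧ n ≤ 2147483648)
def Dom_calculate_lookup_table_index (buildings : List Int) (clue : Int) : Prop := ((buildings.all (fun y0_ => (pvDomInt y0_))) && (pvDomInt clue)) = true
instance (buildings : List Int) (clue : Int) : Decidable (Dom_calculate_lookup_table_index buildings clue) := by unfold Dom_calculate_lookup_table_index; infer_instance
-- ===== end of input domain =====

-- B replaces A's Horner shifted accumulator by a reverse-order positional weighted
-- sum with an explicit growing shift exponent (alternative decomposition, same cost).


-- ===== PORT A =====
-- x << 3 on a Python int (any sign) is exactly x * 2^3.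
def calculate_lookup_table_index (buildings : List Int) (clue : Int) : Int :=
  let lookup_table_index := buildings.foldl (fun acc b => acc * 2 ^ 3 + b) 0
  lookup_table_index * 2 ^ 3 + clue

-- ===== PORT B =====
-- b << shift with shift ≥ 0 is b * 2^shift; shift starts at 3 and grows by 3.
def calculate_lookup_table_index_alt (buildings : List Int) (clue : Int) : Int :=
  (buildings.reverse.foldl (fun (p : Int × Nat) b => (p.1 + b * 2 ^ p.2, p.2 + 3)) (clue, 3)).1

-- ===== PRECONDITION & SPEC =====
def Spec_calculate_lookup_table_index (buildings : List Int) (clue : Int) (out : Int) : Prop := out = calculate_lookup_table_index_alt buildings clue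
instance (buildings : List Int) (clue : Int) (out : Int) : Decidable (Spec_calculate_lookup_table_index buildings clue out) := by unfold Spec_calculate_lookup_table_index; infer_instance

-- ===== CLAIM (what is proved, stated in full; the proofs are below) =====
def Claim_equal_calculate_lookup_table_index : Prop := ∀ (buildings : List Int) (clue : Int), Dom_calculate_lookup_table_index buildings clue → Spec_calculate_lookup_table_index buildings clue (calculate_lookup_table_index buildings clue)

-- ===== LEMMAS AND PROOFS =====

-- Horner fold over zs ++ [y] peels the last digit.
theorem pv_horner_snoc (zs : List Int) (y : Int) :
    (zs ++ [y]).foldl (fun acc b => acc * 2 ^ 3 + b) 0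
      = (zs.foldl (fun acc b => acc * 2 ^ 3 + b) 0) * 2 ^ 3 + y := by
  simp [List.foldl_append]

-- B's reverse fold computes r + (Horner of ys.reverse) * 2^s.
theorem pv_alt_fold (ys : List Int) (r : Int) (s : Nat) :
    (ys.foldl (fun (p : Int × Nat) b => (p.1 + b * 2 ^ p.2, p.2 + 3)) (r, s)).1
      = r + (ys.reverse.foldl (fun acc b => acc * 2 ^ 3 + b) 0) * 2 ^ s := by
  induction ys generalizing r s with
  | nil => simp
  | cons y ys ih =>
      simp only [List.foldl_cons, List.reverse_cons, pv_horner_snoc, ih]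
      ring

-- ===== VERDICT (by name: the statement is the Claim_ definition above) =====
theorem calculate_lookup_table_index_spec : Claim_equal_calculate_lookup_table_index := by
  intro buildings clue _
  unfold Spec_calculate_lookup_table_index calculate_lookup_table_index calculate_lookup_table_index_alt
  rw [pv_alt_fold, List.reverse_reverse]
  ring
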